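-- pv_equiv track=rewrite | github.com/nebius/soperator | images/worker/worker_init.py | _format_tier_topology
-- ===== SOURCE A (Python) =====
-- def _format_tier_topology(parts: dict) -> str:
--     """
--     Format tier-based topology from a dictionary.
--
--     Args:
--         parts: Dictionary with tier keys like {"tier-1": "switch1", "tier-2": "rack1"}
--
--     Returns:
--         Formatted Slurm Topology string using the lowest tier as the leaf switch/block.
--
--     For dynamic topology in Slurm, we only need to specify the leaf switch (lowest tier).
--     The slurmctld already knows the topology structure from topology.conf.
--
--     Example:
--       - {"tier-0": "block1", "tier-1": "rack1"} -> "topology=default:root:block1"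
--       - {"tier-1": "leaf00", "tier-2": "spine00"} -> "topology=default:root:leaf00"
--     """
--     if not parts:
--         return ""
--
--     # Find all tier keys and their numbers
--     tier_keys = []
--     for k in parts.keys():
--         if k.startswith("tier-"):
--             try:
--                 tier_num = int(k.split("-")[1])
--                 tier_keys.append((tier_num, k))
--             except (ValueError, IndexError):
--                 continue
--
--     if tier_keys:
--         tier_keys.sort(key=lambda x: x[0])
--         lowest_tier_key = tier_keys[0][1]
--         leaf_switch = parts[lowest_tier_key]
--         return f"topology=default:root:{leaf_switch}"
--
--     if parts:
--         first_value = next(iter(parts.values()))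
--         return f"topology=default:root:{first_value}"
--
--     return ""
-- ===== SOURCE B (Python) =====
-- def _format_tier_topology(parts: dict) -> str:
--     if not parts:
--         return ""
--     best = None  # (tier_num, key) with the smallest tier_num, first one on ties
--     for k in parts.keys():
--         if k.startswith("tier-"):
--             try:
--                 n = int(k.split("-")[1])
--             except (ValueError, IndexError):
--                 continue
--             if best is None or n < best[0]:
--                 best = (n, k)
--     if best is not None:
--         return f"topology=default:root:{parts[best[1]]}"
--     return f"topology=default:root:{next(iter(parts.values()))}"
-- ===== Notes on version B (the rewrite author's own statement) =====
-- stated objective: simpler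
-- what changed: Replaces building a list of all tier keys and sorting it with a single linear scan that keeps the running minimum tier (strict '<' preserves A's stable-sort first-occurrence tie-break).
import Mathlib
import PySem

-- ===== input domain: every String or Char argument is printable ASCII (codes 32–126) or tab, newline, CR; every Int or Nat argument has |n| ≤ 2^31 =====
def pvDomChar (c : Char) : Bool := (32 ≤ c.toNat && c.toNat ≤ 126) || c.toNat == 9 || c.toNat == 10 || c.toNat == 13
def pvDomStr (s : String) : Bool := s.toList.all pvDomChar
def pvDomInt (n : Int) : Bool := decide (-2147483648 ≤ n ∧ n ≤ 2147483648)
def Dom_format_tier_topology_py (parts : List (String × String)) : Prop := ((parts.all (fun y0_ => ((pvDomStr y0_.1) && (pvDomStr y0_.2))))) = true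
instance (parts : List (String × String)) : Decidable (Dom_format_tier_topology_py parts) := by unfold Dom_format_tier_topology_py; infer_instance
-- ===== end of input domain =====

-- B replaces A's collect-all-then-sort with one linear scan keeping the running minimum tier (objective: simpler).

-- ===== PORT A =====
-- shared key parser: k.startswith("tier-") and int(k.split("-")[1]); none where Python raises ValueError/IndexError (A catches both)
def pvTierOf (k : String) : Option Int :=
  if PySem.Str.startswith k "tier-" then
    match PySem.Str.split? k "-" with
    | none => none
    | some segs =>
      match PySem.List.pyGet? segs 1 with
      | none => none
      | some seg => PySem.Int.ofStr? seg
  else none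

def format_tier_topology_py (parts : List (String × String)) : String :=
  let d := PySem.Dict.ofList parts
  if d.items = [] then ""
  else
    let tier_keys : List (Int × String) :=
      d.keys.foldl (fun acc k =>
        match pvTierOf k with
        | some n => acc ++ [(n, k)]
        | none => acc) []
    if tier_keys = [] then
      match d.values with
      | [] => ""
      | v :: _ => "topology=default:root:" ++ v
    else
      match PySem.List.sorted tier_keys (fun p => p.1) false with
      | [] => ""
      | (_, k0) :: _ => "topology=default:root:" ++ PySem.Dict.getD d k0 ""

-- ===== PORT B =====
def format_tier_topology_py_alt (parts : List (String × String)) : String :=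
  let d := PySem.Dict.ofList parts
  match d.items with
  | [] => ""
  | (_, v0) :: _ =>
    let best : Option (Int × String) :=
      d.keys.foldl (fun b k =>
        match pvTierOf k with
        | some n =>
          match b with
          | none => some (n, k)
          | some (bn, bk) => if n < bn then some (n, k) else some (bn, bk)
        | none => b) none
    match best with
    | some (_, bk) => "topology=default:root:" ++ PySem.Dict.getD d bk ""
    | none => "topology=default:root:" ++ v0

-- ===== PRECONDITION & SPEC =====
def Spec_format_tier_topology_py (parts : List (String × String)) (out : String) : Prop := out = format_tier_topology_py_alt parts
instance (parts : List (String × String)) (out : String) : Decidable (Spec_format_tier_topology_py parts out) := by unfold Spec_format_tier_topology_py; infer_instance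

-- ===== CLAIM (what is proved, stated in full; the proofs are below) =====
def Claim_equal_format_tier_topology_py : Prop := ∀ (parts : List (String × String)), Dom_format_tier_topology_py parts → Spec_format_tier_topology_py parts (format_tier_topology_py parts)

-- ===== LEMMAS AND PROOFS =====

-- the running-min step B applies to each parsed tier pair
def pvMinStep (b : Option (Int × String)) (p : Int × String) : Option (Int × String) :=
  match b with
  | none => some p
  | some (bn, bk) => if p.1 < bn then some p else some (bn, bk)

-- A's accumulator appends: pulling the accumulator out front
theorem pvAstep_acc (ks : List String) (acc : List (Int × String)) :
    ks.foldl (fun acc k => match pvTierOf k with | some n => acc ++ [(n, k)] | none => acc) acc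
      = acc ++ ks.foldl (fun acc k => match pvTierOf k with | some n => acc ++ [(n, k)] | none => acc) [] := by
  induction ks generalizing acc with
  | nil => simp only [List.foldl_nil, List.append_nil]
  | cons k ks ih =>
    simp only [List.foldl_cons]
    cases h : pvTierOf k with
    | none => exact ih acc
    | some n =>
      simp only [List.nil_append]
      rw [ih (acc ++ [(n, k)]), ih ([(n, k)]), List.append_assoc]

-- B's filtered fold over the keys = the running-min fold over A's tier_keys list
theorem pvBfold_eq_minfold (ks : List String) (b : Option (Int × String)) :
    ks.foldl (fun b k =>
        match pvTierOf k with
        | some n =>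
          match b with
          | none => some (n, k)
          | some (bn, bk) => if n < bn then some (n, k) else some (bn, bk)
        | none => b) b
      = (ks.foldl (fun acc k => match pvTierOf k with | some n => acc ++ [(n, k)] | none => acc) []).foldl pvMinStep b := by
  induction ks generalizing b with
  | nil => simp only [List.foldl_nil]
  | cons k ks ih =>
    simp only [List.foldl_cons]
    cases h : pvTierOf k with
    | none => exact ih b
    | some n =>
      simp only [List.nil_append]
      rw [ih, pvAstep_acc ks ([(n, k)])]
      simp only [List.foldl_append, List.foldl_cons, List.foldl_nil]
      cases b <;> rfl

-- one insertion step of the stable insertion sort moves the head by exactly pvMinStep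
theorem pvHead_insertBy (x : Int × String) (acc : List (Int × String)) :
    (PySem.List.insertBy (fun a b => decide (a.1 < b.1)) x acc).head? = pvMinStep acc.head? x := by
  cases acc with
  | nil => rfl
  | cons y t =>
    simp only [PySem.List.insertBy, pvMinStep, List.head?_cons]
    by_cases h : x.1 < y.1 <;> simp [h]

-- head of the insertion-sort fold = running-min fold of the head
theorem pvHead_foldl_insertBy (xs : List (Int × String)) (acc : List (Int × String)) :
    (xs.foldl (fun acc x => PySem.List.insertBy (fun a b => decide (a.1 < b.1)) x acc) acc).head?
      = xs.foldl pvMinStep acc.head? := by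
  induction xs generalizing acc with
  | nil => rfl
  | cons x xs ih =>
    simp only [List.foldl_cons]
    rw [ih, pvHead_insertBy]

-- head of the stable sort by first component = the running minimum (strict '<', first wins ties)
theorem pvSorted_head (xs : List (Int × String)) :
    (PySem.List.sorted xs (fun p => p.1) false).head? = xs.foldl pvMinStep none := by
  rw [PySem.List.sorted_eq_foldl_insertBy, pvHead_foldl_insertBy]
  rfl

-- ===== VERDICT (by name: the statement is the Claim_ definition above) =====
theorem format_tier_topology_py_spec : Claim_equal_format_tier_topology_py := by
  intro parts _
  unfold Spec_format_tier_topology_py format_tier_topology_py format_tier_topology_py_alt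
  set d := PySem.Dict.ofList parts with hd
  cases hitems : d.items with
  | nil => simp [hitems]
  | cons p rest =>
    rcases p with ⟨k0, v0⟩
    simp only [hitems, reduceCtorEq, if_false]
    set tier_keys : List (Int × String) :=
      d.keys.foldl (fun acc k =>
        match pvTierOf k with
        | some n => acc ++ [(n, k)]
        | none => acc) [] with htk
    have hb := pvBfold_eq_minfold d.keys none
    rw [← htk] at hb
    have hh := pvSorted_head tier_keys
    simp only [hb, ← hh]
    cases hs : PySem.List.sorted tier_keys (fun p => p.1) false with
    | nil =>
      have : tier_keys = [] := (PySem.List.sorted_eq_nil_iff _ _ _).1 hs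
      simp [this, PySem.Dict.values, hitems]
    | cons q qs =>
      have htk_ne : tier_keys ≠ [] := by
        intro hnil
        rw [hnil] at hs
        simp [PySem.List.sorted] at hs
      rcases q with ⟨n0, kk⟩
      simp [htk_ne]
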